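-- pv_equiv track=rewrite | github.com/ReneFabricius/project-euler | pr115.py | F
-- ===== SOURCE A (Python) =====
-- class MyCacher:
--     D = {}
--     def __init__(self, func):
--         self.func = func
--
--     def __call__(self, m, n):
--         if (m, n) in self.D:
--             return self.D[(m, n)]
--         res = self.func(m, n)
--         self.D[(m, n)] = res
--         return res
--
-- def F(m, l):
--     @MyCacher
--     def computeWays(b, n):
--         c = 1
--
--         for bl in range(b, n + 1):
--             for bp in range(0, n - bl + 1):
--                 rl = n - bp - bl - 1
--                 if rl >= b:
--                     c += computeWays(b, rl)
--                 else:
--                     c += 1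
--
--         return c
--
--     w = computeWays(m, l)
--     return w
-- ===== SOURCE B (Python) =====
-- def F(m, l):
--     # Linear DP with running prefix sums over the block-placement recurrence.
--     if l < m:
--         return 1
--     S = 1            # S(t)  = sum_{r=-1}^{t} g(r), currently t = -1
--     T = 1            # T(t)  = sum_{j=-1}^{t} S(j), currently t = -1
--     Ws = [2]         # Ws[i] = number of ways for total length m + i; W(m) = 2
--     for n in range(m + 1, l + 1):
--         t = n - m - 1
--         S += Ws[t - m] if t >= m else 1
--         T += S
--         Ws.append(1 + T)
--     return Ws[l - m]
-- ===== Notes on version B (the rewrite author's own statement) =====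
-- stated objective: alternative
-- what changed: Replaced the memoized double-loop recursion (for each length, two nested loops over block length and position with recursive calls) by a single linear pass that maintains the two running prefix sums S and T of the block-placement recurrence.
import Mathlib
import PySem

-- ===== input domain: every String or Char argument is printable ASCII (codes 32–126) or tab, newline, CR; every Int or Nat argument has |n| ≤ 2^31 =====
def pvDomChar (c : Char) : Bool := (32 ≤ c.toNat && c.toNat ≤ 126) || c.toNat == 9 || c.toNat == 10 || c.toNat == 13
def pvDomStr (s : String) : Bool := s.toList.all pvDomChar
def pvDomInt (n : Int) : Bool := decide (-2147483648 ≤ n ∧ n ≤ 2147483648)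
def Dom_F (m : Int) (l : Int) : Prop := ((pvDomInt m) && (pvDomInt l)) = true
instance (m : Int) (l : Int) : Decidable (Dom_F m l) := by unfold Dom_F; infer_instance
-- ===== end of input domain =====

-- B replaces A's memoized double-loop recursion by a single linear pass that maintains the
-- two running prefix sums of the block-placement recurrence (objective: alternative).


-- ===== PORT A =====
-- A's inner recursion together with its memo cache (MyCacher's dict D, keyed by the full
-- argument pair (b, n)), threaded through as explicit state; the fuel counter only makes
-- the recursion well-founded: on Pre_F every recursive call strictly decreases n, so fuel
-- l.toNat + 1 is never exhausted.
def cwA : Nat → Int → Int → PySem.Dict (Int × Int) Int → Int × PySem.Dict (Int × Int) Int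
  | 0, _, _, d => (1, d)
  | fuel+1, b, n, d =>
    match PySem.Dict.get? d (b, n) with
    | some v => (v, d)
    | none =>
      let r := (PySem.List.pyRange b (n+1) 1).foldl (fun (cd : Int × PySem.Dict (Int × Int) Int) bl =>
        (PySem.List.pyRange 0 (n - bl + 1) 1).foldl (fun cd bp =>
          let rl := n - bp - bl - 1
          if rl ≥ b then
            let vd := cwA fuel b rl cd.2
            (cd.1 + vd.1, vd.2)
          else (cd.1 + 1, cd.2)) cd) (1, d)
      (r.1, PySem.Dict.insert r.2 (b, n) r.1)

def F (m : Int) (l : Int) : Int := (cwA (l.toNat + 1) m l PySem.Dict.empty).1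

-- ===== PORT B =====
-- state (S, T, Ws); the Ws[t-m] and Ws[l-m] reads are always in range under Pre_F,
-- so Python's Ws[·] is ported as the total pyGetD with default 0.
def F_alt (m : Int) (l : Int) : Int :=
  if l < m then 1
  else
    let st := (PySem.List.pyRange (m+1) (l+1) 1).foldl
      (fun (st : Int × Int × List Int) n =>
        let t := n - m - 1
        let S := st.1 + (if t ≥ m then PySem.List.pyGetD st.2.2 (t - m) 0 else 1)
        let T := st.2.1 + S
        (S, T, st.2.2 ++ [1 + T])) (1, 1, [2])
    PySem.List.pyGetD st.2.2 (l - m) 0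

-- ===== PRECONDITION & SPEC =====
-- Pre_F excludes m < 0 with m ≤ l: there A's recursion can call itself on ever larger
-- lengths and never terminates (Python raises RecursionError).
def Pre_F (m : Int) (l : Int) : Prop := 0 ≤ m ∨ l < m
instance (m : Int) (l : Int) : Decidable (Pre_F m l) := by unfold Pre_F; infer_instance

def pvWitness_F : Int × Int := (3, 12)

def Spec_F (m : Int) (l : Int) (out : Int) : Prop := out = F_alt m l
instance (m : Int) (l : Int) (out : Int) : Decidable (Spec_F m l out) := by unfold Spec_F; infer_instance

-- ===== CLAIM (what is proved, stated in full; the proofs are below) =====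
def Claim_equal_F : Prop := ∀ (m : Int) (l : Int), Dom_F m l → Pre_F m l → Spec_F m l (F m l)

-- ===== LEMMAS AND PROOFS =====

-- The mathematical prefix-sum pair of the recurrence: (STm b u).1 = S(u-1) and
-- (STm b u).2 = T(u-1), where S(t) = Σ_{r=-1..t} g(r), T(t) = Σ_{j=-1..t} S(j),
-- g(r) = W(r) if r ≥ b else 1, and the number of ways is W(n) = 1 + T(n-b-1).
def STm (b : Nat) : Nat → Int × Int
  | 0 => (1, 1)
  | (u+1) =>
    let g : Int := if b ≤ u then 1 + (STm b (u - b)).2 else 1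
    let S := (STm b u).1 + g
    (S, (STm b u).2 + S)
  termination_by u => u
  decreasing_by all_goals omega

def mathW (b n : Nat) : Int := if b ≤ n then 1 + (STm b (n - b)).2 else 1

def gI (b : Nat) (r : Int) : Int := if (b : Int) ≤ r then mathW b r.toNat else 1

lemma STm_succ (b u : Nat) : STm b (u+1) =
    ((STm b u).1 + (if b ≤ u then 1 + (STm b (u - b)).2 else 1),
     (STm b u).2 + ((STm b u).1 + (if b ≤ u then 1 + (STm b (u - b)).2 else 1))) := by
  rw [STm]

lemma gI_natCast (b K : Nat) : gI b (K : Int) = (if b ≤ K then 1 + (STm b (K - b)).2 else 1) := by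
  simp only [gI, mathW, Int.toNat_natCast]
  by_cases h : b ≤ K
  · simp [h, Int.ofNat_le.mpr h]
  · have h' : ¬ ((b:Int) ≤ (K:Int)) := by exact_mod_cast h
    simp [h, h']

lemma sum_rev_g (b : Nat) : ∀ K : Nat,
    (((List.range (K+1)).map (fun bp : Nat => gI b ((K : Int) - 1 - (bp : Int)))).sum) = (STm b K).1 := by
  intro K
  induction K with
  | zero =>
    have h : ¬ ((b:Int) ≤ -1) := by omega
    simp only [Nat.cast_zero, gI]
    norm_num [h, STm]
  | succ K ih =>
    rw [List.range_succ_eq_map]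
    simp only [List.map_cons, List.map_map, List.sum_cons, Nat.cast_zero]
    have h1 : ((fun bp : Nat => gI b (((K+1 : Nat) : Int) - 1 - (bp : Int))) ∘ Nat.succ)
        = (fun bp : Nat => gI b ((K : Int) - 1 - (bp : Int))) := by
      funext bp
      have : (((K+1 : Nat) : Int) - 1 - (Nat.succ bp : Nat)) = ((K : Int) - 1 - bp) := by
        push_cast; ring
      simp only [Function.comp, this]
    rw [h1, ih]
    have h2 : (((K+1 : Nat) : Int) - 1 - (0:Int)) = (K : Int) := by push_cast; ring
    rw [h2, gI_natCast, STm_succ]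
    ring

lemma sum_rev_S (b : Nat) : ∀ k : Nat,
    (((List.range (k+1)).map (fun j : Nat => (STm b (k - j)).1)).sum) = (STm b k).2 := by
  intro k
  induction k with
  | zero => simp [STm]
  | succ k ih =>
    rw [List.range_succ_eq_map]
    simp only [List.map_cons, List.map_map, List.sum_cons, Nat.sub_zero]
    have h1 : ((fun j : Nat => (STm b (k + 1 - j)).1) ∘ Nat.succ)
        = (fun j : Nat => (STm b (k - j)).1) := by
      funext j; simp only [Function.comp, Nat.succ_sub_succ]
    rw [h1, ih, STm_succ]
    ring

def CacheInv (b : Nat) (d : PySem.Dict (Int × Int) Int) : Prop :=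
  ∀ (n' : Int) (v : Int), PySem.Dict.get? d ((b : Int), n') = some v → 0 ≤ n' ∧ v = mathW b n'.toNat

lemma sum_gI_inner (b n : Nat) (bl : Int) (_hbl1 : (b : Int) ≤ bl) (hbl2 : bl ≤ (n : Int)) :
    ((PySem.List.pyRange 0 ((n : Int) - bl + 1) 1).map
      (fun bp => gI b ((n : Int) - bp - bl - 1))).sum = (STm b (((n : Int) - bl).toNat)).1 := by
  rw [PySem.List.pyRange_one, List.map_map]
  have hK : (((n : Int) - bl + 1 - 0).toNat) = ((n : Int) - bl).toNat + 1 := by omega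
  have hfun : ((fun bp => gI b ((n : Int) - bp - bl - 1)) ∘ (fun k : Nat => (0:Int) + (k:Int)))
      = (fun k : Nat => gI b (((((n : Int) - bl).toNat : Nat) : Int) - 1 - (k : Int))) := by
    funext k
    have h3 : (n : Int) - (0 + (k:Int)) - bl - 1 = (((((n : Int) - bl).toNat : Nat)) : Int) - 1 - (k:Int) := by omega
    simp only [Function.comp, h3]
  rw [hK, hfun, sum_rev_g]

lemma sum_STm_outer (b n : Nat) (hbn : b ≤ n) :
    ((PySem.List.pyRange (b : Int) ((n : Int)+1) 1).map
      (fun bl => (STm b (((n : Int) - bl).toNat)).1)).sum = (STm b (n - b)).2 := by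
  rw [PySem.List.pyRange_one, List.map_map]
  have hK : (((n : Int)+1 - (b : Int)).toNat) = (n - b) + 1 := by omega
  have hfun : ((fun bl => (STm b (((n : Int) - bl).toNat)).1) ∘ (fun k : Nat => (b : Int) + (k : Int)))
      = (fun k : Nat => (STm b ((n - b) - k)).1) := by
    funext k
    have h3 : ((n : Int) - ((b : Int) + (k : Int))).toNat = (n - b) - k := by omega
    simp only [Function.comp, h3]
  rw [hK, hfun, sum_rev_S]

lemma cwA_eq : ∀ (f : Nat) (b n : Nat) (d : PySem.Dict (Int × Int) Int), n < f → CacheInv b d →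
    (cwA f (b : Int) (n : Int) d).1 = mathW b n ∧ CacheInv b (cwA f (b : Int) (n : Int) d).2 := by
  intro f
  induction f with
  | zero => intro b n d hn; omega
  | succ f ihf =>
    intro b n d hn hInv
    rw [cwA]
    cases hg : PySem.Dict.get? d ((b : Int), (n : Int)) with
    | some v =>
      obtain ⟨-, hv⟩ := hInv _ _ hg
      simp only [hv, Int.toNat_natCast]
      exact ⟨trivial, hInv⟩
    | none =>
      simp only []
      have hinner : ∀ (bl : Int), (b : Int) ≤ bl →
          ∀ (L : List Int), (∀ bp ∈ L, 0 ≤ bp) →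
          ∀ (cd : Int × PySem.Dict (Int × Int) Int), CacheInv b cd.2 →
          (L.foldl (fun cd bp =>
            let rl := (n : Int) - bp - bl - 1
            if rl ≥ (b : Int) then
              let vd := cwA f (b : Int) rl cd.2
              (cd.1 + vd.1, vd.2)
            else (cd.1 + 1, cd.2)) cd).1
            = cd.1 + (L.map (fun bp => gI b ((n : Int) - bp - bl - 1))).sum
          ∧ CacheInv b (L.foldl (fun cd bp =>
            let rl := (n : Int) - bp - bl - 1
            if rl ≥ (b : Int) then
              let vd := cwA f (b : Int) rl cd.2
              (cd.1 + vd.1, vd.2)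
            else (cd.1 + 1, cd.2)) cd).2 := by
        intro bl hbl L
        induction L with
        | nil => intro _ cd hcd; exact ⟨by simp, hcd⟩
        | cons bp L ihL =>
          intro hmem cd hcd
          have hbp0 : (0:Int) ≤ bp := hmem bp (List.mem_cons_self ..)
          simp only [List.foldl_cons, List.map_cons, List.sum_cons]
          by_cases hge : ((n : Int) - bp - bl - 1) ≥ (b : Int)
          · have h0 : (0:Int) ≤ (n : Int) - bp - bl - 1 := by omega
            have hcast : (((((n : Int) - bp - bl - 1).toNat) : Nat) : Int) = (n : Int) - bp - bl - 1 :=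
              Int.toNat_of_nonneg h0
            have hlt : ((n : Int) - bp - bl - 1).toNat < f := by omega
            obtain ⟨hv1, hv2⟩ := ihf b (((n : Int) - bp - bl - 1).toNat) cd.2 hlt hcd
            rw [hcast] at hv1 hv2
            have hgI : gI b ((n : Int) - bp - bl - 1) = mathW b (((n : Int) - bp - bl - 1).toNat) := by
              rw [gI, if_pos hge]
            obtain ⟨hr1, hr2⟩ := ihL (fun x hx => hmem x (List.mem_cons_of_mem _ hx))
              (cd.1 + (cwA f (b : Int) ((n : Int) - bp - bl - 1) cd.2).1,
               (cwA f (b : Int) ((n : Int) - bp - bl - 1) cd.2).2) hv2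
            simp only [ge_iff_le, if_pos hge] at hr1 hr2 ⊢
            refine ⟨?_, hr2⟩
            rw [hr1, hv1, hgI]
            ring
          · have hgI : gI b ((n : Int) - bp - bl - 1) = 1 := by
              rw [gI, if_neg hge]
            obtain ⟨hr1, hr2⟩ := ihL (fun x hx => hmem x (List.mem_cons_of_mem _ hx))
              (cd.1 + 1, cd.2) hcd
            simp only [ge_iff_le, if_neg hge] at hr1 hr2 ⊢
            refine ⟨?_, hr2⟩
            rw [hr1, hgI]
            ring
      have houter : ∀ (L : List Int), (∀ bl ∈ L, (b : Int) ≤ bl ∧ bl ≤ (n : Int)) →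
          ∀ (cd : Int × PySem.Dict (Int × Int) Int), CacheInv b cd.2 →
          (L.foldl (fun cd bl =>
            (PySem.List.pyRange 0 ((n : Int) - bl + 1) 1).foldl (fun cd bp =>
              let rl := (n : Int) - bp - bl - 1
              if rl ≥ (b : Int) then
                let vd := cwA f (b : Int) rl cd.2
                (cd.1 + vd.1, vd.2)
              else (cd.1 + 1, cd.2)) cd) cd).1
            = cd.1 + (L.map (fun bl => (STm b (((n : Int) - bl).toNat)).1)).sum
          ∧ CacheInv b (L.foldl (fun cd bl =>
            (PySem.List.pyRange 0 ((n : Int) - bl + 1) 1).foldl (fun cd bp =>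
              let rl := (n : Int) - bp - bl - 1
              if rl ≥ (b : Int) then
                let vd := cwA f (b : Int) rl cd.2
                (cd.1 + vd.1, vd.2)
              else (cd.1 + 1, cd.2)) cd) cd).2 := by
        intro L
        induction L with
        | nil => intro _ cd hcd; exact ⟨by simp, hcd⟩
        | cons bl L ihL =>
          intro hmem cd hcd
          obtain ⟨hbl1, hbl2⟩ := hmem bl (List.mem_cons_self ..)
          simp only [List.foldl_cons, List.map_cons, List.sum_cons]
          obtain ⟨hi1, hi2⟩ := hinner bl hbl1 (PySem.List.pyRange 0 ((n : Int) - bl + 1) 1)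
            (fun bp hbp => ((PySem.List.mem_pyRange_one).1 hbp).1) cd hcd
          obtain ⟨hr1, hr2⟩ := ihL (fun x hx => hmem x (List.mem_cons_of_mem _ hx)) _ hi2
          refine ⟨?_, hr2⟩
          rw [hr1, hi1, sum_gI_inner b n bl hbl1 hbl2]
          ring
      obtain ⟨hm1, hm2⟩ := houter (PySem.List.pyRange (b : Int) ((n : Int)+1) 1)
        (fun bl hbl => by
          obtain ⟨h1, h2⟩ := (PySem.List.mem_pyRange_one).1 hbl
          exact ⟨h1, by omega⟩) (1, d) hInv
      constructor
      · simp only [hm1]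
        by_cases hbn : b ≤ n
        · rw [sum_STm_outer b n hbn, mathW, if_pos hbn]
        · rw [PySem.List.pyRange_one_eq_nil (by omega), mathW, if_neg hbn]
          simp
      · intro n' v hget
        rw [PySem.Dict.get?_insert] at hget
        by_cases hk : ((b : Int), n') = ((b : Int), (n : Int))
        · rw [if_pos hk] at hget
          have hn' : n' = (n : Int) := by
            have := congrArg Prod.snd hk; simpa using this
          have hv : v = _ := (Option.some_injective _ hget.symm)
          subst hn'
          refine ⟨by positivity, ?_⟩
          rw [hv, Int.toNat_natCast, hm1]
          by_cases hbn : b ≤ n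
          · rw [sum_STm_outer b n hbn, mathW, if_pos hbn]
          · rw [PySem.List.pyRange_one_eq_nil (by omega), mathW, if_neg hbn]
            simp
        · rw [if_neg hk] at hget
          exact hm2 n' v hget

lemma mathW_self (m : Nat) : mathW m m = 2 := by
  rw [mathW, if_pos le_rfl]
  simp [STm]

lemma F_alt_loop (m : Nat) : ∀ k : Nat,
    ((PySem.List.pyRange ((m : Int)+1) ((m : Int)+1+(k : Int)) 1).foldl
      (fun (st : Int × Int × List Int) n =>
        let t := n - (m : Int) - 1
        let S := st.1 + (if t ≥ (m : Int) then PySem.List.pyGetD st.2.2 (t - (m : Int)) 0 else 1)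
        let T := st.2.1 + S
        (S, T, st.2.2 ++ [1 + T])) (1, 1, [2]))
    = ((STm m k).1, (STm m k).2, (List.range (k+1)).map (fun i => mathW m (m+i))) := by
  intro k
  induction k with
  | zero =>
    rw [show ((m : Int)+1+((0:Nat) : Int)) = (m : Int)+1 by push_cast; ring]
    rw [PySem.List.pyRange_one_eq_nil le_rfl]
    simp [STm, List.range_one, mathW_self]
  | succ k ih =>
    rw [show ((m : Int)+1+(((k+1):Nat) : Int)) = ((m : Int)+1+(k : Int))+1 by push_cast; ring]
    rw [PySem.List.pyRange_one_succ_right (by omega), List.foldl_append]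
    rw [ih]
    simp only [List.foldl_cons, List.foldl_nil]
    have ht : ((m : Int)+1+(k : Int)) - (m : Int) - 1 = (k : Int) := by ring
    rw [ht]
    by_cases hmk : m ≤ k
    · have hge : ((k : Int) ≥ (m : Int)) := by omega
      have hc : (k : Int) - (m : Int) = ((k - m : Nat) : Int) := by omega
      rw [if_pos hge, hc, PySem.List.pyGetD_natCast,
        PySem.List.getD_map_range _ _ _ _ (by omega)]
      have hW : mathW m (m + (k - m)) = 1 + (STm m (k - m)).2 := by
        rw [mathW, if_pos (by omega), Nat.add_sub_cancel_left]
      rw [hW]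
      have hS : (STm m (k+1)).1 = (STm m k).1 + (1 + (STm m (k - m)).2) := by
        rw [STm_succ, if_pos hmk]
      have hT : (STm m (k+1)).2 = (STm m k).2 + (STm m (k+1)).1 := by
        rw [STm_succ]
      have hf : mathW m (m + (k+1)) = 1 + (STm m (k+1)).2 := by
        rw [mathW, if_pos (by omega), Nat.add_sub_cancel_left]
      rw [← hS, ← hT, show List.range (k+1+1) = List.range (k+1) ++ [k+1] from List.range_succ]
      simp only [List.map_append, List.map_cons, List.map_nil, hf]
    · have hge : ¬ ((k : Int) ≥ (m : Int)) := by omega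
      rw [if_neg hge]
      have hS : (STm m (k+1)).1 = (STm m k).1 + 1 := by
        rw [STm_succ, if_neg hmk]
      have hT : (STm m (k+1)).2 = (STm m k).2 + (STm m (k+1)).1 := by
        rw [STm_succ]
      have hf : mathW m (m + (k+1)) = 1 + (STm m (k+1)).2 := by
        rw [mathW, if_pos (by omega), Nat.add_sub_cancel_left]
      rw [← hS, ← hT, show List.range (k+1+1) = List.range (k+1) ++ [k+1] from List.range_succ]
      simp only [List.map_append, List.map_cons, List.map_nil, hf]

lemma cacheInv_empty (b : Nat) : CacheInv b PySem.Dict.empty := by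
  intro n' v h
  rw [PySem.Dict.get?_empty] at h
  cases h

lemma F_eq_F_alt : ∀ (m l : Int), (0 ≤ m ∨ l < m) → F m l = F_alt m l := by
  intro m l hpre
  by_cases hlm : l < m
  · rw [F_alt, if_pos hlm, F, cwA, PySem.Dict.get?_empty,
      PySem.List.pyRange_one_eq_nil (by omega), List.foldl_nil]
  · have hm : 0 ≤ m := by omega
    have hl : 0 ≤ l := by omega
    lift m to Nat using hm with b
    lift l to Nat using hl with n
    have hble : b ≤ n := by omega
    calc F (b : Int) (n : Int)
        = mathW b n := by
          rw [F, show (((n : Int)).toNat + 1) = n + 1 by simp]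
          exact (cwA_eq (n+1) b n PySem.Dict.empty (by omega) (cacheInv_empty b)).1
      _ = F_alt (b : Int) (n : Int) := by
          have hc : ¬ ((n : Int) < (b : Int)) := by omega
          rw [F_alt, if_neg hc]
          rw [show ((n : Int)+1) = ((b : Int)+1+((n - b : Nat) : Int)) by omega]
          rw [F_alt_loop b (n - b)]
          rw [show ((n : Int) - (b : Int)) = ((n - b : Nat) : Int) by omega,
            PySem.List.pyGetD_natCast, PySem.List.getD_map_range _ _ _ _ (by omega),
            show b + (n - b) = n by omega]

-- ===== VERDICT (by name: the statement is the Claim_ definition above) =====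
theorem F_spec : Claim_equal_F := by
  intro m l _ hpre
  show F m l = F_alt m l
  exact F_eq_F_alt m l hpre
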